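-- pv_equiv track=rewrite | github.com/unclaw-ai/unclaw | src/unclaw/skills/versioning.py | _compare_release_segments
-- ===== SOURCE A (Python) =====
-- def _compare_release_segments(
--     local_segments: tuple[int, ...],
--     catalog_segments: tuple[int, ...],
-- ) -> int:
--     max_length = max(len(local_segments), len(catalog_segments))
--     padded_local = (*local_segments, *(0 for _ in range(max_length - len(local_segments))))
--     padded_catalog = (
--         *catalog_segments,
--         *(0 for _ in range(max_length - len(catalog_segments))),
--     )
--     for local_part, catalog_part in zip(padded_local, padded_catalog):
--         if local_part == catalog_part:
--             continue
--         return -1 if local_part < catalog_part else 1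
--     return 0
-- ===== SOURCE B (Python) =====
-- def _strip_trailing_zeros(t):
--     n = len(t)
--     while n and t[n - 1] == 0:
--         n -= 1
--     return t[:n]
--
--
-- def _first_nonzero_sign(t):
--     for v in t:
--         if v:
--             return 1 if v > 0 else -1
--     return 0
--
--
-- def _cmp(l, c):
--     for a, b in zip(l, c):
--         if a != b:
--             return -1 if a < b else 1
--     if len(l) > len(c):
--         return _first_nonzero_sign(l[len(c):])
--     if len(c) > len(l):
--         return -_first_nonzero_sign(c[len(l):])
--     return 0
--
--
-- def _compare_release_segments(
--     local_segments: tuple[int, ...],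
--     catalog_segments: tuple[int, ...],
-- ) -> int:
--     # Canonicalize: trailing zeros never influence the ordering, so drop them,
--     # then compare; an exhausted side is decided by the sign of the first
--     # nonzero element of the other side's remainder (no zero-padding anywhere).
--     return _cmp(
--         _strip_trailing_zeros(local_segments),
--         _strip_trailing_zeros(catalog_segments),
--     )
-- ===== Notes on version B (the rewrite author's own statement) =====
-- stated objective: alternative
-- what changed: B never pads: it first canonicalizes both tuples by stripping trailing zeros, scans only the common prefix, and decides a longer side by the sign of the first nonzero element of its remainder instead of comparing padded elements against 0.
import Mathlib
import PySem

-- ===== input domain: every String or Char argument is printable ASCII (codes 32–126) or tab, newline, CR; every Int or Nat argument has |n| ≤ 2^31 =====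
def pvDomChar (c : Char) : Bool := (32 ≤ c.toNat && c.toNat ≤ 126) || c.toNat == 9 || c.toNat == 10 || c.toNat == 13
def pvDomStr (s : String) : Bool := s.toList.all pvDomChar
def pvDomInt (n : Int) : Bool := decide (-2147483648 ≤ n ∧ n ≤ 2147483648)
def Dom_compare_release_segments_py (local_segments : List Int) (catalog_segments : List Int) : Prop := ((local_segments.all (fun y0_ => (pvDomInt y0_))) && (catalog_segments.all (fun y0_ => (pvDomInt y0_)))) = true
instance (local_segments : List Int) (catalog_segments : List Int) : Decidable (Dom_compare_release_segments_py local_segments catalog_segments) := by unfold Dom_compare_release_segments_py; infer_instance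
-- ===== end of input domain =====

-- B replaces A's zero-padding + zip scan by canonicalization (strip trailing zeros)
-- followed by a structural comparison that decides an exhausted side by the sign of
-- the first nonzero element of the other side's remainder; same return value.

-- ===== PORT A =====
-- the for-loop over zip(padded_local, padded_catalog)
def pvAloop : List (Int × Int) → Int
  | [] => 0
  | (a, b) :: rest => if a == b then pvAloop rest else if a < b then -1 else 1

def compare_release_segments_py (local_segments : List Int) (catalog_segments : List Int) : Int :=
  let max_length := max local_segments.length catalog_segments.length
  let padded_local := local_segments ++ List.replicate (max_length - local_segments.length) 0
  let padded_catalog := catalog_segments ++ List.replicate (max_length - catalog_segments.length) 0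
  pvAloop (padded_local.zip padded_catalog)

-- ===== PORT B =====
-- the while-loop of _strip_trailing_zeros: n decreases while t[n-1] == 0
def pvStripLoop (t : List Int) (n : Nat) : Nat :=
  if n ≠ 0 ∧ t.getD (n - 1) 0 == 0 then pvStripLoop t (n - 1) else n
termination_by n
decreasing_by omega

-- _strip_trailing_zeros: t[:n] after the loop
def pvStrip (t : List Int) : List Int := t.take (pvStripLoop t t.length)

-- _first_nonzero_sign
def pvFirstNonzeroSign : List Int → Int
  | [] => 0
  | v :: t => if v ≠ 0 then (if v > 0 then 1 else -1) else pvFirstNonzeroSign t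

-- _cmp: the for-loop over zip(l, c) (early return on first mismatch)
def pvBscan : List (Int × Int) → Option Int
  | [] => none
  | (a, b) :: r => if a ≠ b then some (if a < b then -1 else 1) else pvBscan r

-- _cmp: scan the common part, then decide a longer side by _first_nonzero_sign of its remainder
def pvBcmp (l c : List Int) : Int :=
  match pvBscan (l.zip c) with
  | some r => r
  | none =>
    if l.length > c.length then pvFirstNonzeroSign (l.drop c.length)
    else if c.length > l.length then -pvFirstNonzeroSign (c.drop l.length)
    else 0

def compare_release_segments_py_alt (local_segments : List Int) (catalog_segments : List Int) : Int :=
  pvBcmp (pvStrip local_segments) (pvStrip catalog_segments)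

-- ===== PRECONDITION & SPEC =====
def Spec_compare_release_segments_py (local_segments : List Int) (catalog_segments : List Int) (out : Int) : Prop := out = compare_release_segments_py_alt local_segments catalog_segments
instance (local_segments : List Int) (catalog_segments : List Int) (out : Int) : Decidable (Spec_compare_release_segments_py local_segments catalog_segments out) := by unfold Spec_compare_release_segments_py; infer_instance

-- ===== CLAIM (what is proved, stated in full; the proofs are below) =====
def Claim_equal_compare_release_segments_py : Prop := ∀ (local_segments : List Int) (catalog_segments : List Int), Dom_compare_release_segments_py local_segments catalog_segments → Spec_compare_release_segments_py local_segments catalog_segments (compare_release_segments_py local_segments catalog_segments)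

-- ===== LEMMAS AND PROOFS =====

-- structural characterisation of A's padded comparison
def pvCmp : List Int → List Int → Int
  | [], [] => 0
  | a :: l, b :: c => if a == b then pvCmp l c else if a < b then -1 else 1
  | a :: l, [] => if a == 0 then pvCmp l [] else if a < 0 then -1 else 1
  | [], b :: c => if (0 : Int) == b then pvCmp [] c else if (0 : Int) < b then -1 else 1

theorem pvA_eq_cmp : ∀ (l c : List Int),
    pvAloop ((l ++ List.replicate (max l.length c.length - l.length) (0 : Int)).zip
      (c ++ List.replicate (max l.length c.length - c.length) (0 : Int))) = pvCmp l c := by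
  intro l
  induction l with
  | nil =>
    intro c
    induction c with
    | nil => simp [pvAloop, pvCmp]
    | cons b c ihc =>
      simp only [List.length_nil, List.length_cons] at ihc ⊢
      have e : max 0 c.length - c.length = 0 := by omega
      rw [e] at ihc
      simp only [Nat.zero_max, Nat.sub_zero, List.replicate_zero,
        List.append_nil, List.nil_append] at ihc ⊢
      simp only [List.replicate_succ, Nat.sub_self, List.replicate_zero,
        List.append_nil, List.zip_cons_cons, pvAloop, pvCmp, ihc]
  | cons a l ihl =>
    intro c
    cases c with
    | nil =>
      have ih := ihl []
      simp only [List.length_nil, List.length_cons] at ih ⊢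
      have e : max l.length 0 - l.length = 0 := by omega
      rw [e] at ih
      simp only [Nat.max_zero, Nat.sub_zero, List.replicate_zero,
        List.append_nil, List.nil_append] at ih ⊢
      simp only [List.replicate_succ, Nat.sub_self, List.replicate_zero,
        List.append_nil, List.zip_cons_cons, pvAloop, pvCmp, ih]
    | cons b c =>
      have ih := ihl c
      simp only [List.length_cons]
      have h1 : max (l.length + 1) (c.length + 1) - (l.length + 1)
          = max l.length c.length - l.length := by omega
      have h2 : max (l.length + 1) (c.length + 1) - (c.length + 1)
          = max l.length c.length - c.length := by omega
      rw [h1, h2]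
      simp only [List.cons_append, List.zip_cons_cons, pvAloop, pvCmp, ih]

-- B's comparison agrees with pvCmp on ALL lists (stripping is then shown harmless)
theorem pvCmp_nil_left : ∀ (c : List Int), pvCmp [] c = -pvFirstNonzeroSign c := by
  intro c
  induction c with
  | nil => simp [pvCmp, pvFirstNonzeroSign]
  | cons b c ihc =>
    simp only [pvCmp, pvFirstNonzeroSign]
    by_cases hb : b = 0
    · subst hb; simpa using ihc
    · rcases lt_or_gt_of_ne hb with h | h
      · simp [hb, Ne.symm hb, not_lt.mpr (le_of_lt h)]
      · simp [hb, Ne.symm hb, h]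

theorem pvCmp_nil_right : ∀ (l : List Int), pvCmp l [] = pvFirstNonzeroSign l := by
  intro l
  induction l with
  | nil => simp [pvCmp, pvFirstNonzeroSign]
  | cons a l ihl =>
    simp only [pvCmp, pvFirstNonzeroSign]
    by_cases ha : a = 0
    · subst ha; simpa using ihl
    · rcases lt_or_gt_of_ne ha with h | h
      · simp [ha, h, le_of_lt h]
      · simp [ha, h, not_lt.mpr (le_of_lt h)]

theorem pvB_eq_cmp : ∀ (l c : List Int), pvBcmp l c = pvCmp l c := by
  intro l
  induction l with
  | nil =>
    intro c
    cases c with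
    | nil => simp [pvBcmp, pvBscan, pvCmp]
    | cons b c => rw [pvCmp_nil_left]; simp [pvBcmp, pvBscan]
  | cons a l ihl =>
    intro c
    cases c with
    | nil => rw [pvCmp_nil_right]; simp [pvBcmp, pvBscan]
    | cons b c =>
      by_cases h : a = b
      · subst h
        have := ihl c
        simp only [pvBcmp, List.zip_cons_cons, pvBscan, List.length_cons,
          List.drop_succ_cons, pvCmp] at this ⊢
        simp only [ne_eq, not_true_eq_false, if_false, beq_self_eq_true, if_true,
          Nat.add_lt_add_iff_right, gt_iff_lt]
        exact this
      · simp [pvBcmp, pvBscan, pvCmp, h]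

-- pvCmp ignores one trailing zero on either side
theorem pvCmp_append_zero_left : ∀ (l c : List Int), pvCmp (l ++ [0]) c = pvCmp l c := by
  intro l
  induction l with
  | nil =>
    intro c
    cases c with
    | nil => simp [pvCmp]
    | cons b c => simp [pvCmp]
  | cons a l ihl =>
    intro c
    cases c with
    | nil => simp only [List.cons_append, pvCmp, ihl []]
    | cons b c => simp only [List.cons_append, pvCmp, ihl c]

theorem pvCmp_append_zero_right : ∀ (c l : List Int), pvCmp l (c ++ [0]) = pvCmp l c := by
  intro c
  induction c with
  | nil =>
    intro l
    cases l with
    | nil => simp [pvCmp]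
    | cons a l => simp [pvCmp]
  | cons b c ihc =>
    intro l
    cases l with
    | nil => simp only [List.cons_append, pvCmp, ihc []]
    | cons a l => simp only [List.cons_append, pvCmp, ihc l]

-- the strip loop preserves pvCmp of the take
theorem pvStripLoop_cmp_left : ∀ (n : Nat) (t c : List Int), n ≤ t.length →
    pvCmp (t.take (pvStripLoop t n)) c = pvCmp (t.take n) c := by
  intro n
  induction n with
  | zero => intro t c _; rw [pvStripLoop]; simp
  | succ n ih =>
    intro t c hn
    rw [pvStripLoop]
    by_cases h : (n + 1 ≠ 0 ∧ t.getD (n + 1 - 1) 0 == 0)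
    · rw [if_pos h]
      have h0 : t.getD n 0 = 0 := by simpa using h.2
      have hlt : n < t.length := by omega
      have hget : t[n]'hlt = (0 : Int) := by
        simpa [List.getD_eq_getElem?_getD, List.getElem?_eq_getElem hlt] using h0
      have htake : t.take (n + 1) = t.take n ++ [0] := by
        rw [List.take_add_one]
        simp [List.getElem?_eq_getElem hlt, hget]
      rw [show n + 1 - 1 = n from rfl, ih t c (by omega), htake, pvCmp_append_zero_left]
    · rw [if_neg h]

theorem pvStripLoop_cmp_right : ∀ (n : Nat) (t l : List Int), n ≤ t.length →
    pvCmp l (t.take (pvStripLoop t n)) = pvCmp l (t.take n) := by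
  intro n
  induction n with
  | zero => intro t l _; rw [pvStripLoop]; simp
  | succ n ih =>
    intro t l hn
    rw [pvStripLoop]
    by_cases h : (n + 1 ≠ 0 ∧ t.getD (n + 1 - 1) 0 == 0)
    · rw [if_pos h]
      have h0 : t.getD n 0 = 0 := by simpa using h.2
      have hlt : n < t.length := by omega
      have hget : t[n]'hlt = (0 : Int) := by
        simpa [List.getD_eq_getElem?_getD, List.getElem?_eq_getElem hlt] using h0
      have htake : t.take (n + 1) = t.take n ++ [0] := by
        rw [List.take_add_one]
        simp [List.getElem?_eq_getElem hlt, hget]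
      rw [show n + 1 - 1 = n from rfl, ih t l (by omega), htake, pvCmp_append_zero_right]
    · rw [if_neg h]

theorem pvCmp_strip (l c : List Int) : pvCmp (pvStrip l) (pvStrip c) = pvCmp l c := by
  unfold pvStrip
  rw [pvStripLoop_cmp_left _ _ _ (le_refl _), pvStripLoop_cmp_right _ _ _ (le_refl _),
    List.take_length, List.take_length]

-- ===== VERDICT (by name: the statement is the Claim_ definition above) =====
theorem compare_release_segments_py_spec : Claim_equal_compare_release_segments_py := by
  intro l c _
  unfold Spec_compare_release_segments_py compare_release_segments_py compare_release_segments_py_alt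
  rw [pvA_eq_cmp, pvB_eq_cmp, pvCmp_strip]
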